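-- pv_equiv track=rewrite | github.com/spyderbat/spyctl-cli | spyctl/resources/connections.py | _shorten_v6
-- ===== SOURCE A (Python) =====
-- def _shorten_v6(ip):
--     if ":" not in ip:
--         return ip
--     ip = ip.replace("0000", "zero")
--     i = 0
--     pos = -1
--     most = 0
--     last = 0
--     num = 0
--     while i < len(ip):
--         if ip[i : i + 4] == "zero":
--             if num == 0:
--                 last = i
--             num += 1
--             if num > most:
--                 most = num
--                 pos = last
--         else:
--             num = 0
--         i += 5
--     len_diff = 39 - len(ip)
--     if ip.endswith("*"):
--         len_diff += 1
--     if pos != -1: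
--         ip = ip[:pos] + ":" + ip[pos + most * 5 :]
--         if pos == 0:
--             ip = ":" + ip
--     ip = ip.replace("0", "")
--     ip = ip.replace("zero", "0")
--     if len_diff > 0:
--         ip += f" (+{len_diff})"
--     return ip
-- ===== SOURCE B (Python) =====
-- def _true_runs(bools):
--     runs = []
--     i = 0
--     while i < len(bools):
--         j = i
--         while j < len(bools) and bools[j] == bools[i]:
--             j += 1
--         if bools[i]:
--             runs.append((i, j - i))
--         i = j
--     return runs
--
--
-- def _shorten_v6(ip):
--     if ":" not in ip:
--         return ip
--     ip = ip.replace("0000", "zero")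
--     zero_chunks = [ip[j:j + 4] == "zero" for j in range(0, len(ip), 5)]
--     pos = -1
--     most = 0
--     for idx, n in _true_runs(zero_chunks):
--         if n > most:
--             pos = idx * 5
--             most = n
--     len_diff = 39 - len(ip)
--     if ip.endswith("*"):
--         len_diff += 1
--     if pos != -1:
--         ip = ip[:pos] + ":" + ip[pos + most * 5:]
--         if pos == 0:
--             ip = ":" + ip
--     ip = ip.replace("0", "")
--     ip = ip.replace("zero", "0")
--     if len_diff > 0:
--         ip += f" (+{len_diff})"
--     return ip
-- ===== Notes on version B (the rewrite author's own statement) =====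
-- stated objective: alternative
-- what changed: Replaces A's single online while-loop with four state variables (pos/most/last/num) by a pipeline: chunk the string into a boolean list marking the collapsible groups, run-length encode it into (start, length) runs, then pick the first longest run with a separate argmax pass.
import Mathlib
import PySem

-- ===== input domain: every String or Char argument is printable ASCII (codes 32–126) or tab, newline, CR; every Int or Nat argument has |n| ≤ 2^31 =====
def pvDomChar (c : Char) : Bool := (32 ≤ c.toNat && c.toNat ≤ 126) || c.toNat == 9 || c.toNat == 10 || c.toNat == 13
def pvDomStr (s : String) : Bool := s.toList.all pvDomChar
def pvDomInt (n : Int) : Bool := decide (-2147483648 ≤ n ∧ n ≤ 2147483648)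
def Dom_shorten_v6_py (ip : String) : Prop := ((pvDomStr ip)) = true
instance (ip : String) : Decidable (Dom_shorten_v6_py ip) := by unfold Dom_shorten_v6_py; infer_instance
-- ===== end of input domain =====

-- B replaces A's online 4-variable scan by chunking into booleans, run-length encoding
-- the runs of 'zero' chunks, and taking the first longest run (objective: alternative).

-- ===== PORT A =====
-- A's while-loop body (state: pos, most, last, num; i is the current position).
def aStep (cs : List Char) (st : Int × Int × Int × Int) (i : Int) : Int × Int × Int × Int :=
  match st with
  | (pos, most, last, num) =>
    if PySem.List.slice cs (some i) (some (i + 4)) = "zero".toList then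
      let last := if num = 0 then i else last
      let num := num + 1
      if num > most then (last, num, last, num) else (pos, most, last, num)
    else (pos, most, last, (0 : Int))

def shorten_v6_py (ip : String) : String :=
  if PySem.Str.isIn ":" ip = false then ip
  else
    let cs := PySem.Chars.replace ip.toList "0000".toList "zero".toList
    let st := (PySem.List.pyRange 0 (cs.length : Int) 5).foldl (aStep cs) (-1, 0, 0, 0)
    let pos := st.1
    let most := st.2.1
    let len_diff := (39 : Int) - (cs.length : Int)
    let len_diff := if PySem.Chars.endswith cs "*".toList then len_diff + 1 else len_diff
    let cs :=
      if pos ≠ -1 then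
        let cs' := PySem.List.slice cs none (some pos) ++
          (":".toList ++ PySem.List.slice cs (some (pos + most * 5)) none)
        if pos = 0 then ':' :: cs' else cs'
      else cs
    let cs := PySem.Chars.replace cs "0".toList []
    let cs := PySem.Chars.replace cs "zero".toList "0".toList
    let cs := if len_diff > 0 then cs ++ (" (+".toList ++ PySem.Int.toChars len_diff ++ ")".toList) else cs
    String.ofList cs

-- ===== PORT B =====
-- length of the leading run of value b (B's inner 'while j' counter, relative form)
def runLen (b : Bool) : List Bool → Nat
  | [] => 0
  | x :: xs => if x = b then runLen b xs + 1 else 0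

-- B's _true_runs: run-length encode, keep (start index, length) of the True runs.
def trueRuns : List Bool → Nat → List (Nat × Nat)
  | [], _ => []
  | b :: rest, i =>
    let n := runLen b rest + 1
    (if b then [(i, n)] else []) ++ trueRuns (rest.drop (n - 1)) (i + n)
termination_by bs _ => bs.length
decreasing_by simp

-- B's 'first longest run' accumulator body
def bStep (pm : Int × Int) (r : Nat × Nat) : Int × Int :=
  if (r.2 : Int) > pm.2 then ((r.1 : Int) * 5, (r.2 : Int)) else pm

def shorten_v6_py_alt (ip : String) : String :=
  if PySem.Str.isIn ":" ip = false then ip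
  else
    let cs := PySem.Chars.replace ip.toList "0000".toList "zero".toList
    let chunks := (PySem.List.pyRange 0 (cs.length : Int) 5).map
      (fun j => decide (PySem.List.slice cs (some j) (some (j + 4)) = "zero".toList))
    let pm := (trueRuns chunks 0).foldl bStep (-1, 0)
    let pos := pm.1
    let most := pm.2
    let len_diff := (39 : Int) - (cs.length : Int)
    let len_diff := if PySem.Chars.endswith cs "*".toList then len_diff + 1 else len_diff
    let cs :=
      if pos ≠ -1 then
        let cs' := PySem.List.slice cs none (some pos) ++
          (":".toList ++ PySem.List.slice cs (some (pos + most * 5)) none)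
        if pos = 0 then ':' :: cs' else cs'
      else cs
    let cs := PySem.Chars.replace cs "0".toList []
    let cs := PySem.Chars.replace cs "zero".toList "0".toList
    let cs := if len_diff > 0 then cs ++ (" (+".toList ++ PySem.Int.toChars len_diff ++ ")".toList) else cs
    String.ofList cs

-- ===== PRECONDITION & SPEC =====
def Spec_shorten_v6_py (ip : String) (out : String) : Prop := out = shorten_v6_py_alt ip
instance (ip : String) (out : String) : Decidable (Spec_shorten_v6_py ip out) := by unfold Spec_shorten_v6_py; infer_instance

-- ===== CLAIM (what is proved, stated in full; the proofs are below) =====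
def Claim_equal_shorten_v6_py : Prop := ∀ (ip : String), Dom_shorten_v6_py ip → Spec_shorten_v6_py ip (shorten_v6_py ip)

-- ===== LEMMAS AND PROOFS =====

-- A's step, rephrased on the boolean of chunk k (position 5*k)
def stepAB (st : Int × Int × Int × Int) (b : Bool) (k : Nat) : Int × Int × Int × Int :=
  match st with
  | (pos, most, last, num) =>
    if b then
      let last := if num = 0 then (5 * (k : Int)) else last
      let num := num + 1
      if num > most then (last, num, last, num) else (pos, most, last, num)
    else (pos, most, last, (0 : Int))

def foldAB : List Bool → Nat → (Int × Int × Int × Int) → (Int × Int × Int × Int)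
  | [], _, st => st
  | b :: rest, k, st => foldAB rest (k + 1) (stepAB st b k)

def fchk (cs : List Char) (k : Nat) : Bool :=
  decide (PySem.List.slice cs (some (5 * (k : Int))) (some (5 * (k : Int) + 4)) = "zero".toList)

theorem pyRange05 (n : Int) :
    PySem.List.pyRange 0 n 5 =
      (List.range (if 0 < n then ((n + 4) / 5).toNat else 0)).map (fun k : Nat => (5 : Int) * (k : Int)) := by
  simp only [PySem.List.pyRange]
  rw [if_neg (by norm_num)]
  have h : n - 0 + 5 - 1 = n + 4 := by ring
  rw [h]
  simp only [zero_add]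
  rw [if_pos (by norm_num)]

theorem bridgeA (cs : List Char) :
    ∀ (m k0 : Nat) (st : Int × Int × Int × Int),
      (List.range' k0 m).foldl (fun st (k : Nat) => aStep cs st (5 * (k : Int))) st
        = foldAB ((List.range' k0 m).map (fchk cs)) k0 st := by
  intro m
  induction m with
  | zero => intro k0 st; rfl
  | succ m ih =>
    intro k0 st
    rw [List.range'_succ]
    simp only [List.foldl_cons, List.map_cons, foldAB]
    rw [ih]
    congr 1
    simp only [aStep, stepAB, fchk]
    split_ifs with h1 h2 h3 <;> simp_all

theorem foldAB_append (xs ys : List Bool) :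
    ∀ (k : Nat) (st : Int × Int × Int × Int),
      foldAB (xs ++ ys) k st = foldAB ys (k + xs.length) (foldAB xs k st) := by
  induction xs with
  | nil => intro k st; simp [foldAB]
  | cons x xs ih =>
    intro k st
    simp only [List.cons_append, foldAB, ih, List.length_cons]
    congr 1
    omega

theorem runSplit (b : Bool) (xs : List Bool) :
    List.replicate (runLen b xs) b ++ xs.drop (runLen b xs) = xs := by
  induction xs with
  | nil => simp [runLen]
  | cons x xs ih =>
    by_cases h : x = b
    · subst h; simp only [runLen, if_pos rfl, List.replicate_succ, List.cons_append, List.drop_succ_cons]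
      exact congrArg (x :: ·) ih
    · simp [runLen, h]

theorem runHead (b : Bool) (xs : List Bool) :
    xs.drop (runLen b xs) = [] ∨ ∃ ys, xs.drop (runLen b xs) = (!b) :: ys := by
  induction xs with
  | nil => left; rfl
  | cons x xs ih =>
    by_cases h : x = b
    · subst h; simpa [runLen] using ih
    · right
      refine ⟨xs, ?_⟩
      have hx : x = !b := by cases x <;> cases b <;> simp_all
      simp [runLen, h, hx]

theorem falseRun (n : Nat) : ∀ (k : Nat) (p m last : Int),
    foldAB (List.replicate n false) k (p, m, last, 0) = (p, m, last, 0) := by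
  induction n with
  | zero => intro k p m last; rfl
  | succ n ih =>
    intro k p m last
    simp only [List.replicate_succ, foldAB, stepAB]
    exact ih (k+1) p m last

theorem trueRun (t : Nat) : ∀ (k : Nat) (p m last : Int), 0 ≤ m →
    foldAB (List.replicate (t + 1) true) k (p, m, last, 0)
      = (if ((t : Int) + 1) > m then 5 * (k : Int) else p,
         max m ((t : Int) + 1), 5 * (k : Int), (t : Int) + 1) := by
  induction t with
  | zero =>
    intro k p m last hm
    simp only [List.replicate_succ, List.replicate_zero, foldAB, stepAB]
    norm_num
    split_ifs <;> simp_all <;> omega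
  | succ t ih =>
    intro k p m last hm
    have h1 : List.replicate (t + 1 + 1) true = List.replicate (t + 1) true ++ [true] := by
      rw [← List.replicate_succ']
    rw [h1, foldAB_append, ih k p m last hm]
    simp only [foldAB, stepAB, List.length_replicate]
    push_cast
    split_ifs <;> simp_all <;> omega



theorem mainLemma : ∀ (bs : List Bool) (k : Nat) (p m last : Int), 0 ≤ m →
    ((foldAB bs k (p, m, last, 0)).1, (foldAB bs k (p, m, last, 0)).2.1)
      = (trueRuns bs k).foldl bStep (p, m) := by
  intro bs k
  induction bs, k using trueRuns.induct with
  | case1 k => intro p m last hm; simp [trueRuns, foldAB]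
  | case2 b rest i n ih =>
    intro p m last hm
    have hsplit : b :: rest = List.replicate (runLen b rest + 1) b ++ rest.drop (runLen b rest) := by
      conv_lhs => rw [← runSplit b rest]
      rw [List.replicate_succ, List.cons_append]
    have htr : trueRuns (b :: rest) i
        = (if b then [(i, runLen b rest + 1)] else [])
          ++ trueRuns (rest.drop (runLen b rest)) (i + (runLen b rest + 1)) := by
      rw [trueRuns]
      simp
    simp only [n, Nat.add_sub_cancel] at ih
    rw [htr, hsplit, foldAB_append]
    cases b with
    | false =>
      rw [falseRun]
      simp only [List.length_replicate, List.nil_append]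
      have := ih p m last hm
      simpa using this
    | true =>
      rw [trueRun (runLen true rest) i p m last hm]
      simp only [List.length_replicate, if_pos, List.cons_append, List.nil_append,
        List.foldl_cons]
      have hbs : bStep (p, m) (i, runLen true rest + 1)
          = (if ((runLen true rest : Int) + 1) > m then 5 * (i : Int) else p,
             max m ((runLen true rest : Int) + 1)) := by
        simp only [bStep]
        push_cast
        split_ifs <;> simp_all <;> omega
      rw [hbs]
      rcases runHead true rest with h0 | ⟨ys, hys⟩
      · rw [h0]
        simp [trueRuns, foldAB]
      · rw [hys]
        have hstep : foldAB ((!true) :: ys) (i + (runLen true rest + 1))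
            (if ((runLen true rest : Int) + 1) > m then 5 * (i : Int) else p,
             max m ((runLen true rest : Int) + 1), 5 * (i : Int), (runLen true rest : Int) + 1)
            = foldAB ((!true) :: ys) (i + (runLen true rest + 1))
            (if ((runLen true rest : Int) + 1) > m then 5 * (i : Int) else p,
             max m ((runLen true rest : Int) + 1), 5 * (i : Int), 0) := by
          simp [foldAB, stepAB]
        rw [hstep, ← hys]
        have hM : (0:Int) ≤ max m ((runLen true rest : Int) + 1) := le_trans hm (le_max_left _ _)
        have := ih (if ((runLen true rest : Int) + 1) > m then 5 * (i : Int) else p)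
          (max m ((runLen true rest : Int) + 1)) (5 * (i : Int)) hM
        simpa using this

-- ===== VERDICT (by name: the statement is the Claim_ definition above) =====
theorem shorten_v6_py_spec : Claim_equal_shorten_v6_py := by
  intro ip _
  unfold Spec_shorten_v6_py shorten_v6_py shorten_v6_py_alt
  by_cases hg : PySem.Str.isIn ":" ip = false
  · simp only [hg, if_pos rfl, if_true]
  · rw [if_neg hg, if_neg hg]
    set cs := PySem.Chars.replace ip.toList "0000".toList "zero".toList with hcs
    have e1 : (PySem.List.pyRange 0 (cs.length : Int) 5).foldl (aStep cs) (-1, 0, 0, 0)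
        = foldAB ((List.range' 0 (if 0 < (cs.length : Int) then (((cs.length : Int) + 4) / 5).toNat else 0)).map (fchk cs)) 0 (-1, 0, 0, 0) := by
      rw [pyRange05, List.foldl_map, List.range_eq_range', bridgeA]
    have e2 : (PySem.List.pyRange 0 (cs.length : Int) 5).map
          (fun j => decide (PySem.List.slice cs (some j) (some (j + 4)) = "zero".toList))
        = (List.range' 0 (if 0 < (cs.length : Int) then (((cs.length : Int) + 4) / 5).toNat else 0)).map (fchk cs) := by
      rw [pyRange05, List.map_map, List.range_eq_range']
      rfl
    have key : (((PySem.List.pyRange 0 (cs.length : Int) 5).foldl (aStep cs) (-1, 0, 0, 0)).1,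
          ((PySem.List.pyRange 0 (cs.length : Int) 5).foldl (aStep cs) (-1, 0, 0, 0)).2.1)
        = (trueRuns ((PySem.List.pyRange 0 (cs.length : Int) 5).map
            (fun j => decide (PySem.List.slice cs (some j) (some (j + 4)) = "zero".toList))) 0).foldl bStep (-1, 0) := by
      rw [e1, e2]
      exact mainLemma _ 0 (-1) 0 0 (le_refl 0)
    have k1 := congrArg Prod.fst key
    have k2 := congrArg Prod.snd key
    simp only at k1 k2
    simp only []
    rw [k1, k2]
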